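-- pv_equiv track=rewrite | github.com/rsmaller/it240proj | resources/downloadables/hashlet.py | rectify_string_length
-- ===== SOURCE A (Python) =====
-- def rectify_string_length(string, increment):
-- 	length = len(string)
-- 	if length % increment == 0:
-- 		return string
-- 	else:
-- 		while length % increment != 0:
-- 			length -= 1
-- 		return string[:length]
-- ===== SOURCE B (Python) =====
-- def rectify_string_length(string, increment):
-- 	return string[:len(string) - len(string) % abs(increment)]
-- ===== Notes on version B (the rewrite author's own statement) =====
-- stated objective: simpler
-- what changed: Replaces the branch plus the decrement-by-one while loop with a single closed-form slice at the floor multiple, length - length % abs(increment).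
import Mathlib
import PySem

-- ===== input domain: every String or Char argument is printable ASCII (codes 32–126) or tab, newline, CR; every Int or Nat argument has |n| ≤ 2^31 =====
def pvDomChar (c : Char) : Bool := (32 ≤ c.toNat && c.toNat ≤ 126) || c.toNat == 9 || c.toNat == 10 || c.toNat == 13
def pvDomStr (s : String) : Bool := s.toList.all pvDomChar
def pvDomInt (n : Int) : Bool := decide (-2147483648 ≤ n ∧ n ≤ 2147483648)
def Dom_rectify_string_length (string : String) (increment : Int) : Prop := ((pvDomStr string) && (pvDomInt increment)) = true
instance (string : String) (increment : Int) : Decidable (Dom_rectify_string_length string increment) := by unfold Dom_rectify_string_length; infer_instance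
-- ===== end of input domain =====

-- B replaces A's branch-plus-decrementing-loop by one closed-form slice at the floor multiple (simpler).

-- ===== PORT A =====
-- the 'while length % increment != 0: length -= 1' loop, returning the final length
def rectifyLoopA (inc : Int) : Nat → Nat
  | 0 => 0
  | n + 1 => if PySem.Int.mod ((n + 1 : Nat) : Int) inc ≠ 0 then rectifyLoopA inc n else n + 1

def rectify_string_length (string : String) (increment : Int) : String :=
  let length : Nat := string.toList.length
  if PySem.Int.mod (length : Int) increment = 0 then string
  else String.ofList (PySem.List.slice string.toList none (some ((rectifyLoopA increment length : Nat) : Int)))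

-- ===== PORT B =====
def rectify_string_length_alt (string : String) (increment : Int) : String :=
  let n : Int := (string.toList.length : Int)
  String.ofList (PySem.List.slice string.toList none (some (n - PySem.Int.mod n |increment|)))

-- ===== PRECONDITION & SPEC =====
-- increment = 0 makes Python's '%' raise ZeroDivisionError (in both A and B)
def Pre_rectify_string_length (string : String) (increment : Int) : Prop := increment ≠ 0
instance (string : String) (increment : Int) : Decidable (Pre_rectify_string_length string increment) := by unfold Pre_rectify_string_length; infer_instance
def pvWitness_rectify_string_length : String × Int := ("hello", 2)

def Spec_rectify_string_length (string : String) (increment : Int) (out : String) : Prop := out = rectify_string_length_alt string increment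
instance (string : String) (increment : Int) (out : String) : Decidable (Spec_rectify_string_length string increment out) := by unfold Spec_rectify_string_length; infer_instance

-- ===== CLAIM (what is proved, stated in full; the proofs are below) =====
def Claim_equal_rectify_string_length : Prop := ∀ (string : String) (increment : Int), Dom_rectify_string_length string increment → Pre_rectify_string_length string increment → Spec_rectify_string_length string increment (rectify_string_length string increment)

-- ===== LEMMAS AND PROOFS =====

-- mod by the divisor (any sign) is 0 exactly on multiples of |divisor|
theorem pv_mod_zero_iff (n : Nat) (inc : Int) (h : inc ≠ 0) :
    PySem.Int.mod (n : Int) inc = 0 ↔ n % inc.natAbs = 0 := by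
  rw [PySem.Int.mod_eq_zero_iff_dvd]
  constructor
  · intro hd
    have : (inc.natAbs : Int) ∣ (n : Int) := (Int.natAbs_dvd).mpr hd
    have : inc.natAbs ∣ n := Int.ofNat_dvd.mp this
    omega
  · intro hd
    have : inc.natAbs ∣ n := by omega
    have : (inc.natAbs : Int) ∣ (n : Int) := Int.ofNat_dvd.mpr this
    exact (Int.natAbs_dvd).mp this

-- A's while loop computes the floor multiple
theorem pv_loopA_eq (inc : Int) (h : inc ≠ 0) (n : Nat) :
    rectifyLoopA inc n = n - n % inc.natAbs := by
  induction n with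
  | zero => simp [rectifyLoopA]
  | succ n ih =>
    have hm : 0 < inc.natAbs := by omega
    rw [rectifyLoopA]
    simp only [ne_eq, pv_mod_zero_iff (n + 1) inc h]
    by_cases hz : (n + 1) % inc.natAbs = 0
    · simp [hz]
    · simp only [hz, not_false_eq_true, if_pos, ih]
      have h1 : (n + 1) % inc.natAbs = (n % inc.natAbs + 1) % inc.natAbs := by
        conv_lhs => rw [Nat.add_mod]
        conv_rhs => rw [Nat.add_mod]
        simp
      by_cases he : n % inc.natAbs + 1 = inc.natAbs
      · exfalso; apply hz; rw [h1, he]; simp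
      · have hlt : n % inc.natAbs < inc.natAbs := Nat.mod_lt _ hm
        have : (n % inc.natAbs + 1) % inc.natAbs = n % inc.natAbs + 1 :=
          Nat.mod_eq_of_lt (by omega)
        omega

-- ===== VERDICT (by name: the statement is the Claim_ definition above) =====
theorem rectify_string_length_spec : Claim_equal_rectify_string_length := by
  intro s inc _ hpre
  unfold Spec_rectify_string_length rectify_string_length rectify_string_length_alt
  dsimp only
  have habs : |inc| = (inc.natAbs : Int) := Int.abs_eq_natAbs inc
  have hmod : PySem.Int.mod ((s.toList.length : Nat) : Int) |inc| =
      ((s.toList.length % inc.natAbs : Nat) : Int) := by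
    rw [habs]; exact PySem.Int.mod_natCast _ _
  have hmle : s.toList.length % inc.natAbs ≤ s.toList.length := Nat.mod_le _ _
  have hcast : ((s.toList.length : Nat) : Int) - ((s.toList.length % inc.natAbs : Nat) : Int)
      = ((s.toList.length - s.toList.length % inc.natAbs : Nat) : Int) := by omega
  rw [hmod, hcast]
  by_cases h0 : PySem.Int.mod ((s.toList.length : Nat) : Int) inc = 0
  · have hz : s.toList.length % inc.natAbs = 0 := (pv_mod_zero_iff _ inc hpre).mp h0
    rw [if_pos h0, hz, Nat.sub_zero, PySem.List.slice_to_natCast, List.take_length]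
    simp [String.ofList]
  · rw [if_neg h0, pv_loopA_eq inc hpre]
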